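-- pv_equiv track=rewrite | github.com/alosec/cafedelia | sync/jsonl_transformer.py | _group_related_messages
-- ===== SOURCE A (Python) =====
-- from typing import List, Optional
--
-- def _group_related_messages(messages: List[dict]) -> List[List[dict]]:
--     """Group related messages (assistant + tool results) for coherent conversation flow."""
--     groups = []
--     current_group = []
--
--     for msg in messages:
--         msg_type = msg.get('type', '')
--
--         # Start new group for user messages (except tool results)
--         if msg_type == 'user' and 'toolUseResult' not in msg and current_group:
--             if current_group:
--                 groups.append(current_group)
--             current_group = [msg]
--
--         # Start new group for assistant messages
--         elif msg_type == 'assistant':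
--             if current_group:
--                 groups.append(current_group)
--             current_group = [msg]
--
--         # Add tool results to current group (they follow assistant tool use)
--         elif msg_type == 'user' and 'toolUseResult' in msg and current_group:
--             current_group.append(msg)
--
--         # Handle other message types
--         else:
--             if not current_group:
--                 current_group = [msg]
--             else:
--                 current_group.append(msg)
--
--     # Add final group
--     if current_group:
--         groups.append(current_group)
--
--     return groups
-- ===== SOURCE B (Python) =====
-- from typing import List
--
--
-- def _starts_group(msg: dict) -> bool:
--     msg_type = msg.get('type', '')
--     return msg_type == 'assistant' or (msg_type == 'user' and 'toolUseResult' not in msg)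
--
--
-- def _group_related_messages(messages: List[dict]) -> List[List[dict]]:
--     """Group related messages by a single back-to-front pass: walking the
--     messages in reverse, a message joins the group in front of it unless the
--     message currently heading that group starts a new group."""
--     rev_groups = []  # groups in reverse order, each group's messages reversed
--     for msg in reversed(messages):
--         if rev_groups and not _starts_group(rev_groups[-1][-1]):
--             rev_groups[-1].append(msg)
--         else:
--             rev_groups.append([msg])
--     rev_groups.reverse()
--     return [g[::-1] for g in rev_groups]
-- ===== Notes on version B (the rewrite author's own statement) =====
-- stated objective: alternative
-- what changed: Replaces A's forward pass with a current_group accumulator and flush-on-boundary branches by a single reverse traversal: walking messages back-to-front, each message joins the group ahead of it unless that group's leading message starts a new group; no flush logic or carried current group.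
import Mathlib
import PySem

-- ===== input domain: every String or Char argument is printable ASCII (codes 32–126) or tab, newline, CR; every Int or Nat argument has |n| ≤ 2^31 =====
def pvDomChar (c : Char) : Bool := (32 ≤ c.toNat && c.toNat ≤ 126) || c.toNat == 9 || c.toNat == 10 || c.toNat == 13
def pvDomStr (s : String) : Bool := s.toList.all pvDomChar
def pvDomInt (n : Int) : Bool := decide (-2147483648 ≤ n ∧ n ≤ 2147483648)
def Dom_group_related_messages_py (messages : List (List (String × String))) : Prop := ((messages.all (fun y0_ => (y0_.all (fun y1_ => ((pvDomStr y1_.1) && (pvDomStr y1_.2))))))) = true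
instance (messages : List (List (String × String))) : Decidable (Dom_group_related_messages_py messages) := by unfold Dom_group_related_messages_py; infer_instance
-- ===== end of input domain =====

-- B groups the messages by one reverse traversal (a message joins the group after it
-- unless that group's leading message starts a group) instead of A's forward pass with
-- a carried current_group and flush-on-boundary branches; same cost, different shape.

-- shared dict primitives (a message is an association list): msg.get(k, d) and 'k in msg'
def msgGetD (m : List (String × String)) (k d : String) : String :=
  match m.find? (fun p => p.1 == k) with
  | some p => p.2
  | none => d

def msgHasKey (m : List (String × String)) (k : String) : Bool :=
  m.any (fun p => p.1 == k)

-- ===== PORT A =====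
-- one loop step of A: state = (groups, current_group)
def aStep (st : List (List (List (String × String))) × List (List (String × String)))
    (msg : List (String × String)) :
    List (List (List (String × String))) × List (List (String × String)) :=
  let msg_type := msgGetD msg "type" ""
  if msg_type == "user" && !(msgHasKey msg "toolUseResult") && !st.2.isEmpty then
    (if !st.2.isEmpty then st.1 ++ [st.2] else st.1, [msg])
  else if msg_type == "assistant" then
    (if !st.2.isEmpty then st.1 ++ [st.2] else st.1, [msg])
  else if msg_type == "user" && msgHasKey msg "toolUseResult" && !st.2.isEmpty then
    (st.1, st.2 ++ [msg])
  else
    if st.2.isEmpty then (st.1, [msg]) else (st.1, st.2 ++ [msg])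

def group_related_messages_py (messages : List (List (String × String))) :
    List (List (List (String × String))) :=
  let st := messages.foldl aStep ([], [])
  if !st.2.isEmpty then st.1 ++ [st.2] else st.1

-- ===== PORT B =====
def startsGroup (msg : List (String × String)) : Bool :=
  let msg_type := msgGetD msg "type" ""
  msg_type == "assistant" || (msg_type == "user" && !(msgHasKey msg "toolUseResult"))

-- one loop step of B: rev_groups (groups reversed, each group reversed), msg appended
def bStep (rgs : List (List (List (String × String))))
    (msg : List (String × String)) : List (List (List (String × String))) :=
  match rgs.getLast? with
  | some g =>
      if !(startsGroup (g.getLastD [])) then rgs.dropLast ++ [g ++ [msg]]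
      else rgs ++ [[msg]]
  | none => rgs ++ [[msg]]

def group_related_messages_py_alt (messages : List (List (String × String))) :
    List (List (List (String × String))) :=
  let rgs := messages.reverse.foldl bStep []
  rgs.reverse.map List.reverse

-- ===== PRECONDITION & SPEC =====
def Spec_group_related_messages_py (messages : List (List (String × String))) (out : List (List (List (String × String)))) : Prop := out = group_related_messages_py_alt messages
instance (messages : List (List (String × String))) (out : List (List (List (String × String)))) : Decidable (Spec_group_related_messages_py messages out) := by unfold Spec_group_related_messages_py; infer_instance

-- ===== CLAIM (what is proved, stated in full; the proofs are below) =====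
def Claim_equal_group_related_messages_py : Prop := ∀ (messages : List (List (String × String))), Dom_group_related_messages_py messages → Spec_group_related_messages_py messages (group_related_messages_py messages)

-- ===== LEMMAS AND PROOFS =====

-- canonical grouping both ports are reduced to
def G : List (List (String × String)) → List (List (List (String × String)))
  | [] => []
  | m :: ms =>
    match G ms with
    | [] => [[m]]
    | [] :: gs => [m] :: gs
    | (x :: t) :: gs => if startsGroup x then [m] :: (x :: t) :: gs else (m :: x :: t) :: gs

-- A's forward recursion with an explicit open group
def grp (cur : List (List (String × String))) :
    List (List (String × String)) → List (List (List (String × String)))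
  | [] => [cur]
  | m :: ms => if startsGroup m then cur :: grp [m] ms else grp (cur ++ [m]) ms

lemma aStep_empty (gs : List (List (List (String × String)))) (m : List (String × String)) :
    aStep (gs, []) m = (gs, [m]) := by
  simp [aStep]

lemma aStep_nonempty (gs : List (List (List (String × String))))
    (cur : List (List (String × String))) (h : cur ≠ []) (m : List (String × String)) :
    aStep (gs, cur) m =
      if startsGroup m then (gs ++ [cur], [m]) else (gs, cur ++ [m]) := by
  have hne : cur.isEmpty = false := by simpa [List.isEmpty_iff] using h
  simp only [aStep, startsGroup, hne]
  by_cases h1 : msgGetD m "type" "" == "assistant" <;>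
    by_cases h2 : msgGetD m "type" "" == "user" <;>
    by_cases h3 : msgHasKey m "toolUseResult" <;>
    simp [h1, h2, h3]

lemma foldl_aStep_eq_grp (ms : List (List (String × String))) :
    ∀ (gs : List (List (List (String × String)))) (cur : List (List (String × String))),
      cur ≠ [] →
      (let st := ms.foldl aStep (gs, cur)
       if !st.2.isEmpty then st.1 ++ [st.2] else st.1) = gs ++ grp cur ms := by
  induction ms with
  | nil =>
    intro gs cur h
    have hne : cur.isEmpty = false := by simpa [List.isEmpty_iff] using h
    simp [grp, hne]
  | cons m ms ih =>
    intro gs cur h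
    simp only [List.foldl_cons, aStep_nonempty gs cur h m, grp]
    by_cases hs : startsGroup m
    · simpa [hs] using ih (gs ++ [cur]) [m] (by simp)
    · simpa [hs] using ih gs (cur ++ [m]) (by simp)

-- attaching a prefix group to the canonical grouping
def glue (cur : List (List (String × String))) :
    List (List (List (String × String))) → List (List (List (String × String)))
  | [] => [cur]
  | [] :: gs => cur :: gs
  | (x :: t) :: gs => if startsGroup x then cur :: (x :: t) :: gs else (cur ++ x :: t) :: gs

lemma grp_eq_glue (ms : List (List (String × String))) :
    ∀ cur, grp cur ms = glue cur (G ms) := by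
  induction ms with
  | nil => intro cur; simp [grp, G, glue]
  | cons m ms ih =>
    intro cur
    simp only [grp, G]
    rcases hG : G ms with _ | ⟨_ | ⟨x, t⟩, gs⟩
    · by_cases hs : startsGroup m <;> simp [hs, ih, hG, glue]
    · by_cases hs : startsGroup m <;> simp [hs, ih, hG, glue]
    · by_cases hs : startsGroup m <;> by_cases hx : startsGroup x <;>
        simp [hs, hx, ih, hG, glue]

lemma glue_singleton (m : List (String × String)) (l : List (List (List (String × String)))) :
    glue [m] l =
      (match l with
       | [] => [[m]]
       | [] :: gs => [m] :: gs
       | (x :: t) :: gs => if startsGroup x then [m] :: (x :: t) :: gs else (m :: x :: t) :: gs) := by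
  rcases l with _ | ⟨_ | ⟨x, t⟩, gs⟩
  · simp [glue]
  · simp [glue]
  · by_cases hx : startsGroup x <;> simp [glue, hx]

lemma portA_eq_G (ms : List (List (String × String))) :
    group_related_messages_py ms = G ms := by
  cases ms with
  | nil => simp [group_related_messages_py, G]
  | cons m ms =>
    have h1 : group_related_messages_py (m :: ms) = [] ++ grp [m] ms := by
      simpa [group_related_messages_py, aStep_empty] using
        foldl_aStep_eq_grp ms [] [m] (by simp)
    rw [h1, grp_eq_glue, glue_singleton]
    simp [G]

lemma bStep_rev (l : List (List (List (String × String)))) (m : List (String × String)) :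
    bStep ((l.map List.reverse).reverse) m =
      ((match l with
        | [] => [[m]]
        | [] :: gs => [m] :: gs
        | (x :: t) :: gs =>
          if startsGroup x then [m] :: (x :: t) :: gs else (m :: x :: t) :: gs).map
        List.reverse).reverse := by
  rcases l with _ | ⟨_ | ⟨x, t⟩, gs⟩
  · simp [bStep]
  · simp [bStep, startsGroup, msgGetD, msgHasKey]
  · by_cases hx : startsGroup x <;> simp [bStep, hx]

lemma foldl_bStep_eq_G (ms : List (List (String × String))) :
    ms.reverse.foldl bStep [] = ((G ms).map List.reverse).reverse := by
  induction ms with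
  | nil => simp [G]
  | cons m ms ih =>
    rw [List.reverse_cons, List.foldl_append, ih]
    simp only [List.foldl_cons, List.foldl_nil, bStep_rev, G]

lemma portB_eq_G (ms : List (List (String × String))) :
    group_related_messages_py_alt ms = G ms := by
  simp only [group_related_messages_py_alt, foldl_bStep_eq_G ms]
  simp [List.map_map]

-- ===== VERDICT (by name: the statement is the Claim_ definition above) =====
theorem group_related_messages_py_spec : Claim_equal_group_related_messages_py := by
  intro messages _
  unfold Spec_group_related_messages_py
  rw [portA_eq_G, portB_eq_G]
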